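-- pv_equiv track=rewrite | github.com/JKHira/sdsl2_coder | references/sdsl2_lint_samples/lint_utils.py | find_single_quote_col
-- ===== SOURCE A (Python) =====
-- from typing import Iterable, Optional
--
-- def find_single_quote_col(line: str) -> Optional[int]:
--     in_double = False
--     escape = False
--     for index, ch in enumerate(line):
--         if in_double:
--             if escape:
--                 escape = False
--             elif ch == "\\":
--                 escape = True
--             elif ch == "\"":
--                 in_double = False
--             continue
--         if ch == "\"":
--             in_double = True
--             continue
--         if ch == "'":
--             return index + 1
--     return None
-- ===== SOURCE B (Python) =====
-- def find_single_quote_col(line):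
--     n = len(line)
--     i = 0
--     while i < n:
--         sq = line.find("'", i)
--         dq = line.find('"', i)
--         if sq != -1 and (dq == -1 or sq < dq):
--             return sq + 1
--         if dq == -1:
--             return None
--         j = dq + 1
--         while True:
--             close = line.find('"', j)
--             if close == -1:
--                 return None
--             k = close
--             while k > j and line[k - 1] == '\\':
--                 k -= 1
--             if (close - k) % 2 == 0:
--                 i = close + 1
--                 break
--             j = close + 1
--     return None
-- ===== Notes on version B (the rewrite author's own statement) =====
-- stated objective: faster
-- what changed: Replaced A's per-character in_double/escape state machine by a jump-based search: str.find locates the next quote of either kind, and a double-quoted region is closed by repeatedly finding the next double quote and deciding escapedness from the parity of the backslash run immediately before it, with no per-character state carried.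
import Mathlib
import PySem

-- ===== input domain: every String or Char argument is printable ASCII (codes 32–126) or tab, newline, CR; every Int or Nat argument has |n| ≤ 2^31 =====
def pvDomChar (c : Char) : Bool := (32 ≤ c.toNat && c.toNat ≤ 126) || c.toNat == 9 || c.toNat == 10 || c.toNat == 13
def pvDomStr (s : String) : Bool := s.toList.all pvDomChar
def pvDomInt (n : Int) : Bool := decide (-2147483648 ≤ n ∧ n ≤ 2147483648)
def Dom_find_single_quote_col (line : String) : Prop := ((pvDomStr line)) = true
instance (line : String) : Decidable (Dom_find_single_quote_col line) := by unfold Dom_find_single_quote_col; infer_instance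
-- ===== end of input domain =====

-- B replaces A's per-character in_double/escape state machine by str.find jumps: it locates the
-- next quote of either kind, and closes a double-quoted region by finding each next '"' and testing
-- the parity of the backslash run before it (a timing run measured B faster: str.find scans
-- at C level instead of a Python per-character loop).

-- ===== PORT A =====
-- A's for-loop over enumerate(line) with state (in_double, escape), early return on a bare single quote.
def pvALoop : List Char → Int → Bool → Bool → Option Int
  | [], _, _, _ => none
  | c :: rest, idx, in_double, escape =>
    if in_double then
      if escape then pvALoop rest (idx + 1) true false
      else if c = '\\' then pvALoop rest (idx + 1) true true
      else if c = '"' then pvALoop rest (idx + 1) false false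
      else pvALoop rest (idx + 1) true false
    else if c = '"' then pvALoop rest (idx + 1) true false
    else if c = '\'' then some (idx + 1)
    else pvALoop rest (idx + 1) false false

def find_single_quote_col (line : String) : Option Int :=
  pvALoop line.toList 0 false false

-- ===== PORT B =====
-- 'while k > j and line[k - 1] == "\\": k -= 1' — the index k-1 is always in range, so getElem? is exact
def pvRun (l : List Char) (j : Nat) (k : Nat) : Nat :=
  if h : j < k ∧ l[k - 1]? = some '\\' then pvRun l j (k - 1) else k
termination_by k
decreasing_by omega

-- inner 'while True' loop: close the double-quoted region; 'line.find(ch, j)' is PySem.Chars.findFrom.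
-- The fuel argument is only a totality guard (each pass moves past one '"'); it is never exhausted
-- when the top-level call supplies length+1.
def pvInner (l : List Char) : Nat → Nat → Option Nat
  | 0, _ => none
  | fuel + 1, j =>
    let close := PySem.Chars.findFrom l ['"'] (j : Int) none
    if close = -1 then none
    else
      let c := close.toNat
      let k := pvRun l j c
      if (c - k) % 2 = 0 then some (c + 1) else pvInner l fuel (c + 1)

-- outer 'while i < n' loop; same fuel-as-totality-guard remark.
def pvOuter (l : List Char) : Nat → Nat → Option Int
  | 0, _ => none
  | fuel + 1, i =>
    if i < l.length then
      let sq := PySem.Chars.findFrom l ['\''] (i : Int) none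
      let dq := PySem.Chars.findFrom l ['"'] (i : Int) none
      if sq ≠ -1 ∧ (dq = -1 ∨ sq < dq) then some (sq + 1)
      else if dq = -1 then none
      else
        match pvInner l fuel (dq.toNat + 1) with
        | none => none
        | some i' => pvOuter l fuel i'
    else none

def find_single_quote_col_alt (line : String) : Option Int :=
  pvOuter line.toList (line.toList.length + 1) 0

-- ===== PRECONDITION & SPEC =====
def Spec_find_single_quote_col (line : String) (out : Option Int) : Prop := out = find_single_quote_col_alt line
instance (line : String) (out : Option Int) : Decidable (Spec_find_single_quote_col line out) := by unfold Spec_find_single_quote_col; infer_instance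

-- ===== CLAIM (what is proved, stated in full; the proofs are below) =====
def Claim_equal_find_single_quote_col : Prop := ∀ (line : String), Dom_find_single_quote_col line → Spec_find_single_quote_col line (find_single_quote_col line)

-- ===== LEMMAS AND PROOFS =====

-- Intermediate program (proof infrastructure only): the nested skip-the-quoted-region loop over
-- suffix lists; A is proved equal to it, and B's jump-based loops are proved equal to it.
def pvSkipDQ : List Char → Int → List Char × Int
  | [], i => ([], i)
  | c :: rest, i =>
    if c = '\\' then
      match rest with
      | [] => ([], i + 2)
      | _ :: rest' => pvSkipDQ rest' (i + 2)
    else if c = '"' then (rest, i + 1)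
    else pvSkipDQ rest (i + 1)

theorem pvSkipDQ_len : ∀ (l : List Char) (i : Int), (pvSkipDQ l i).1.length ≤ l.length
  | [], _ => Nat.le_refl _
  | c :: rest, i => by
    unfold pvSkipDQ
    split
    · match rest with
      | [] => simp
      | d :: rest' =>
        simp only
        exact Nat.le_trans (pvSkipDQ_len rest' _) (by simp; omega)
    · split
      · simp
      · exact Nat.le_trans (pvSkipDQ_len rest _) (Nat.le_succ _)

def pvBLoop : List Char → Int → Option Int
  | [], _ => none
  | c :: rest, i =>
    if c = '"' then
      pvBLoop (pvSkipDQ rest (i + 1)).1 (pvSkipDQ rest (i + 1)).2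
    else if c = '\'' then some (i + 1)
    else pvBLoop rest (i + 1)
termination_by l => l.length
decreasing_by
  · exact Nat.lt_succ_of_le (pvSkipDQ_len rest (i + 1))
  · simp

theorem pv_skip_quote (rest : List Char) (i : Int) : pvSkipDQ ('"' :: rest) i = (rest, i + 1) := by
  rw [pvSkipDQ.eq_def]; simp

theorem pv_skip_other (c : Char) (rest : List Char) (i : Int) (hb : ¬ c = '\\') (hq : ¬ c = '"') :
    pvSkipDQ (c :: rest) i = pvSkipDQ rest (i + 1) := by
  rw [pvSkipDQ.eq_def]; simp [hb, hq]

theorem pv_skip_bs (d : Char) (rest' : List Char) (i : Int) :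
    pvSkipDQ ('\\' :: d :: rest') i = pvSkipDQ rest' (i + 2) := by
  rw [pvSkipDQ.eq_def]; simp

-- A equals the intermediate program: mutual invariant on the two states.
theorem pv_main : ∀ (n : Nat) (l : List Char), l.length ≤ n → ∀ (i : Int),
    (pvALoop l i true false = pvBLoop (pvSkipDQ l i).1 (pvSkipDQ l i).2) ∧
    (pvALoop l i false false = pvBLoop l i) := by
  intro n
  induction n with
  | zero =>
    intro l hl i
    have : l = [] := List.eq_nil_of_length_eq_zero (Nat.le_zero.mp hl)
    subst this
    simp [pvALoop, pvSkipDQ, pvBLoop]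
  | succ n ih =>
    intro l hl i
    match l with
    | [] => simp [pvALoop, pvSkipDQ, pvBLoop]
    | c :: rest =>
      have hr : rest.length ≤ n := by simpa using Nat.le_of_succ_le_succ hl
      constructor
      · by_cases hb : c = '\\'
        · subst hb
          match rest with
          | [] =>
            simp [pvALoop, pvSkipDQ, pvBLoop]
          | d :: rest' =>
            have hr' : rest'.length ≤ n := by simp at hr; omega
            have h1 := (ih rest' hr' (i + 1 + 1)).1
            have hi : i + 1 + 1 = i + 2 := by ring
            rw [hi] at h1
            rw [pv_skip_bs]
            simpa [pvALoop, hi] using h1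
        · by_cases hq : c = '"'
          · subst hq
            have h2 := (ih rest hr (i + 1)).2
            rw [pv_skip_quote]
            simpa [pvALoop] using h2
          · have h1 := (ih rest hr (i + 1)).1
            rw [pv_skip_other c rest i hb hq]
            simpa [pvALoop, hb, hq] using h1
      · by_cases hq : c = '"'
        · subst hq
          have h1 := (ih rest hr (i + 1)).1
          simpa [pvALoop, pvBLoop] using h1
        · by_cases hs : c = '\''
          · subst hs
            simp [pvALoop, pvBLoop]
          · have h2 := (ih rest hr (i + 1)).2
            simpa [pvALoop, pvBLoop, hq, hs] using h2

-- membership in a suffix, by absolute index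
theorem pv_mem_drop_iff (l : List Char) (j : Nat) (c : Char) :
    c ∈ l.drop j ↔ ∃ q, j ≤ q ∧ q < l.length ∧ l[q]? = some c := by
  constructor
  · intro h
    obtain ⟨m, hm⟩ := List.mem_iff_getElem?.mp h
    rw [List.getElem?_drop] at hm
    have hb := (List.getElem?_eq_some_iff.mp hm).1
    exact ⟨j + m, by omega, hb, hm⟩
  · rintro ⟨q, h1, h2, h3⟩
    apply List.mem_iff_getElem?.mpr
    refine ⟨q - j, ?_⟩
    rw [List.getElem?_drop, show j + (q - j) = q from by omega]
    exact h3

-- full characterisation of line.find(ch, j) for a single-character needle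
theorem pv_ff_spec (l : List Char) (c : Char) (j : Nat) (hj : j ≤ l.length) :
    (PySem.Chars.findFrom l [c] (j : Int) none = -1 ∧
      ∀ q, j ≤ q → q < l.length → l[q]? ≠ some c)
    ∨ (∃ p : Nat, PySem.Chars.findFrom l [c] (j : Int) none = (p : Int) ∧ j ≤ p ∧ p < l.length ∧
        l[p]? = some c ∧ ∀ q, j ≤ q → q < p → l[q]? ≠ some c) := by
  by_cases hneg : PySem.Chars.findFrom l [c] (j : Int) none = -1
  · left
    refine ⟨hneg, ?_⟩
    intro q h1 h2 hqc
    have hni := (PySem.Chars.findFrom_natCast_eq_neg_one_iff l [c] j hj).mp hneg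
    apply hni
    have hc : c ∈ l.drop j := (pv_mem_drop_iff l j c).mpr ⟨q, h1, h2, hqc⟩
    obtain ⟨s1, t1, hst⟩ := List.append_of_mem hc
    exact ⟨s1, t1, by rw [hst]; simp⟩
  · right
    obtain ⟨h1, h2, h3⟩ := PySem.Chars.findFrom_natCast_spec l [c] j hj hneg
    have h0 : (0 : Int) ≤ PySem.Chars.findFrom l [c] (j : Int) none :=
      le_trans (Int.natCast_nonneg j) h1
    refine ⟨(PySem.Chars.findFrom l [c] (j : Int) none).toNat,
      (Int.toNat_of_nonneg h0).symm, by omega, ?_, ?_, ?_⟩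
    · obtain ⟨t, ht⟩ := h2
      have hne : l.drop (PySem.Chars.findFrom l [c] (j : Int) none).toNat ≠ [] := by
        rw [← ht]; simp
      have := List.drop_eq_nil_iff.not.mp hne
      omega
    · obtain ⟨t, ht⟩ := h2
      rw [← List.head?_drop, ← ht]
      simp
    · intro q hq1 hq2 hqc
      apply h3 q (by exact_mod_cast hq1) hq2
      obtain ⟨hlt, hval⟩ := List.getElem?_eq_some_iff.mp hqc
      exact ⟨l.drop (q + 1), by rw [List.drop_eq_getElem_cons hlt, hval]; rfl⟩

-- properties of the backslash-run scan
theorem pv_run_props (l : List Char) (j : Nat) : ∀ (k0 : Nat), j ≤ k0 →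
    j ≤ pvRun l j k0 ∧ pvRun l j k0 ≤ k0 ∧
    (∀ q, pvRun l j k0 ≤ q → q < k0 → l[q]? = some '\\') ∧
    (pvRun l j k0 = j ∨ l[pvRun l j k0 - 1]? ≠ some '\\') := by
  intro k0
  induction k0 using Nat.strong_induction_on with
  | _ k0 ih =>
    intro hj
    rw [pvRun]
    split
    · rename_i h
      obtain ⟨a, b, c, d⟩ := ih (k0 - 1) (by omega) (by omega)
      refine ⟨a, by omega, ?_, d⟩
      intro q hq1 hq2
      by_cases hq : q = k0 - 1
      · subst hq; exact h.2
      · exact c q hq1 (by omega)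
    · rename_i h
      rw [Classical.not_and_iff_not_or_not] at h
      refine ⟨hj, le_refl _, by intro q hq1 hq2; omega, ?_⟩
      rcases h with h | h
      · left; omega
      · right; exact h

-- if the suffix contains no '"', the skip loop consumes everything
theorem pv_skip_no_quote : ∀ (n : Nat) (s : List Char), s.length ≤ n → '"' ∉ s →
    ∀ (i : Int), (pvSkipDQ s i).1 = [] := by
  intro n
  induction n with
  | zero =>
    intro s hl _ i
    have : s = [] := List.eq_nil_of_length_eq_zero (Nat.le_zero.mp hl)
    subst this; simp [pvSkipDQ]
  | succ n ih =>
    intro s hl hq i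
    match s with
    | [] => simp [pvSkipDQ]
    | c :: rest =>
      by_cases hb : c = '\\'
      · subst hb
        match rest with
        | [] => simp [pvSkipDQ]
        | d :: rest' =>
          rw [pv_skip_bs]
          exact ih rest' (by simp at hl ⊢; omega) (by simp at hq ⊢; tauto) _
      · have hqc : ¬ c = '"' := by intro h; subst h; simp at hq
        rw [pv_skip_other c rest i hb hqc]
        exact ih rest (by simpa using Nat.le_of_succ_le_succ hl) (by simp at hq ⊢; tauto) _

-- the skip loop at a '"' stops right after it
theorem pv_seg_close (l : List Char) (j : Nat) (hcl : j < l.length) (hq : l[j]? = some '"') :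
    pvSkipDQ (l.drop j) (j : Int) = (l.drop (j + 1), ((j + 1 : Nat) : Int)) := by
  have h2 := (List.getElem?_eq_some_iff.mp hq).2
  rw [List.drop_eq_getElem_cons hcl, h2, pv_skip_quote]
  refine Prod.ext rfl ?_
  push_cast; ring

-- core segment lemma: between j and the first '"' at close, the skip loop either stops right
-- after close (even backslash run) or jumps past it (odd run)
theorem pv_seg : ∀ (n : Nat) (l : List Char) (j close k : Nat), close - j ≤ n → j ≤ close →
    close < l.length → l[close]? = some '"' →
    (∀ q, j ≤ q → q < close → l[q]? ≠ some '"') →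
    j ≤ k → k ≤ close → (∀ q, k ≤ q → q < close → l[q]? = some '\\') →
    (k = j ∨ l[k - 1]? ≠ some '\\') →
    (((close - k) % 2 = 0 → pvSkipDQ (l.drop j) (j : Int) = (l.drop (close + 1), ((close + 1 : Nat) : Int))) ∧
     ((close - k) % 2 ≠ 0 → pvSkipDQ (l.drop j) (j : Int) = pvSkipDQ (l.drop (close + 1)) ((close + 1 : Nat) : Int))) := by
  intro n
  induction n with
  | zero =>
    intro l j close k hn hjc hcl hq hnq hjk hkc hrun hstop
    have hje : j = close := by omega
    constructor
    · intro _
      rw [hje]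
      exact pv_seg_close l close hcl hq
    · intro h0
      exact absurd (by omega : (close - k) % 2 = 0) h0
  | succ n ih =>
    intro l j close k hn hjc hcl hq hnq hjk hkc hrun hstop
    by_cases hje : j = close
    · constructor
      · intro _
        rw [hje]
        exact pv_seg_close l close hcl hq
      · intro h0
        exact absurd (by omega : (close - k) % 2 = 0) h0
    · have hjclt : j < close := by omega
      have hjl : j < l.length := by omega
      have hx : l[j]? = some l[j] := List.getElem?_eq_getElem hjl
      have hxq : l[j] ≠ '"' := by
        intro he
        exact hnq j (le_refl j) hjclt (by rw [hx, he])
      rw [List.drop_eq_getElem_cons hjl]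
      by_cases hxb : l[j] = '\\'
      · have hk2 : k = j ∨ j + 2 ≤ k := by
          rcases hstop with h | h
          · exact Or.inl h
          · by_cases hkj : k = j
            · exact Or.inl hkj
            · refine Or.inr ?_
              by_cases hk1 : k = j + 1
              · exfalso
                apply h
                rw [hk1]
                simpa [hxb] using hx
              · omega
        by_cases hcj : close = j + 1
        · have hkj : k = j := by
            rcases hk2 with h | h
            · exact h
            · omega
          subst hcj
          constructor
          · intro he; exact absurd he (by omega)
          · intro _
            have hl1 : j + 1 < l.length := hcl
            rw [List.drop_eq_getElem_cons hl1, hxb, pv_skip_bs]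
            rw [show ((j : Int) + 2) = (((j + 1 + 1 : Nat)) : Int) from by push_cast; ring]
        · have hl1 : j + 1 < l.length := by omega
          rw [List.drop_eq_getElem_cons hl1, hxb, pv_skip_bs,
            show ((j : Int) + 2) = (((j + 2 : Nat)) : Int) from by push_cast; ring]
          rcases hk2 with hkj | hk2
          · have hih := ih l (j + 2) close (j + 2) (by omega) (by omega) hcl hq
              (fun q h1 h2 => hnq q (by omega) h2)
              (le_refl _) (by omega) (fun q h1 h2 => hrun q (by omega) h2) (Or.inl rfl)
            subst hkj
            constructor
            · intro he; exact hih.1 (by omega)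
            · intro he; exact hih.2 (by omega)
          · have hstop' : k = j + 2 ∨ l[k - 1]? ≠ some '\\' := by
              rcases hstop with h | h
              · omega
              · exact Or.inr h
            have hih := ih l (j + 2) close k (by omega) (by omega) hcl hq
              (fun q h1 h2 => hnq q (by omega) h2) hk2 hkc hrun hstop'
            exact hih
      · rw [pv_skip_other _ _ _ hxb hxq,
          show ((j : Int) + 1) = (((j + 1 : Nat)) : Int) from by push_cast; ring]
        have hk1 : j + 1 ≤ k := by
          by_contra hcon
          have hkj : k = j := by omega
          have hb := hrun j (by omega) (by omega)
          rw [hx] at hb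
          exact hxb (Option.some_inj.mp hb)
        have hstop' : k = j + 1 ∨ l[k - 1]? ≠ some '\\' := by
          rcases hstop with h | h
          · omega
          · exact Or.inr h
        exact ih l (j + 1) close k (by omega) (by omega) hcl hq
          (fun q h1 h2 => hnq q (by omega) h2) hk1 hkc hrun hstop' 

-- unfolding equations (definitional)
theorem pvInner_zero (l : List Char) (j : Nat) : pvInner l 0 j = none := rfl

theorem pvInner_succ (l : List Char) (f j : Nat) : pvInner l (f + 1) j =
    (if PySem.Chars.findFrom l ['"'] (j : Int) none = -1 then none
     else if ((PySem.Chars.findFrom l ['"'] (j : Int) none).toNat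
         - pvRun l j (PySem.Chars.findFrom l ['"'] (j : Int) none).toNat) % 2 = 0 then
       some ((PySem.Chars.findFrom l ['"'] (j : Int) none).toNat + 1)
     else pvInner l f ((PySem.Chars.findFrom l ['"'] (j : Int) none).toNat + 1)) := rfl

theorem pvOuter_zero (l : List Char) (i : Nat) : pvOuter l 0 i = none := rfl

theorem pvOuter_succ (l : List Char) (f i : Nat) : pvOuter l (f + 1) i =
    (if i < l.length then
      if PySem.Chars.findFrom l ['\''] (i : Int) none ≠ -1 ∧
          (PySem.Chars.findFrom l ['"'] (i : Int) none = -1 ∨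
           PySem.Chars.findFrom l ['\''] (i : Int) none < PySem.Chars.findFrom l ['"'] (i : Int) none) then
        some (PySem.Chars.findFrom l ['\''] (i : Int) none + 1)
      else if PySem.Chars.findFrom l ['"'] (i : Int) none = -1 then none
      else
        match pvInner l f ((PySem.Chars.findFrom l ['"'] (i : Int) none).toNat + 1) with
        | none => none
        | some i' => pvOuter l f i'
    else none) := rfl

-- the inner loop result only moves forward
theorem pv_inner_ge : ∀ (f : Nat) (l : List Char) (j : Nat), j ≤ l.length →
    ∀ i', pvInner l f j = some i' → j + 1 ≤ i' := by
  intro f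
  induction f with
  | zero => intro l j hj i' h; rw [pvInner_zero] at h; exact absurd h (by simp)
  | succ f ih =>
    intro l j hj i' h
    rcases pv_ff_spec l '"' j hj with ⟨hm1, _⟩ | ⟨p, hp, hjp, hplen, hpc, hmin⟩
    · rw [pvInner_succ, hm1] at h; simp at h
    · rw [pvInner_succ] at h
      simp only [hp] at h
      rw [if_neg (by omega)] at h
      simp only [Int.toNat_natCast] at h
      split at h
      · obtain rfl := Option.some_inj.mp h
        omega
      · have := ih l (p + 1) (by omega) i' h
        omega

-- the inner loop agrees with the skip loop (both composed with the continuation)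
theorem pv_inner_eq : ∀ (f : Nat) (l : List Char) (j : Nat), j ≤ l.length →
    l.length + 1 - j ≤ f →
    (match pvInner l f j with
     | none => none
     | some i' => pvBLoop (l.drop i') (i' : Int))
    = pvBLoop (pvSkipDQ (l.drop j) (j : Int)).1 (pvSkipDQ (l.drop j) (j : Int)).2 := by
  intro f
  induction f with
  | zero => intro l j hj hf; exact absurd hf (by omega)
  | succ f ih =>
    intro l j hj hf
    rcases pv_ff_spec l '"' j hj with ⟨hm1, hnone⟩ | ⟨p, hp, hjp, hplen, hpc, hmin⟩
    · rw [pvInner_succ, if_pos hm1]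
      have hnq : '"' ∉ l.drop j := by
        intro hmem
        obtain ⟨q, h1, h2, h3⟩ := (pv_mem_drop_iff l j '"').mp hmem
        exact hnone q h1 h2 h3
      have hempty := pv_skip_no_quote (l.drop j).length (l.drop j) (le_refl _) hnq (j : Int)
      rw [hempty]
      simp [pvBLoop]
    · obtain ⟨hk1, hk2, hk3, hk4⟩ := pv_run_props l j p hjp
      have hseg := pv_seg (p - j) l j p (pvRun l j p) (le_refl _) hjp hplen hpc hmin hk1 hk2 hk3 hk4
      rw [pvInner_succ, hp]
      simp only [Int.toNat_natCast]
      rw [if_neg (show ¬((p : Int) = -1) by omega)]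
      by_cases hpar : (p - pvRun l j p) % 2 = 0
      · rw [if_pos hpar, hseg.1 hpar]
      · rw [if_neg hpar, hseg.2 hpar]
        exact ih l (p + 1) (by omega) (by omega)

-- if the suffix has no quote of either kind, pvBLoop returns none
theorem pv_bloop_none : ∀ (n : Nat) (l : List Char) (i : Nat), l.length - i ≤ n →
    (∀ q, i ≤ q → q < l.length → l[q]? ≠ some '\'' ∧ l[q]? ≠ some '"') →
    pvBLoop (l.drop i) (i : Int) = none := by
  intro n
  induction n with
  | zero =>
    intro l i hn h
    rw [List.drop_eq_nil_iff.mpr (by omega)]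
    simp [pvBLoop]
  | succ n ih =>
    intro l i hn h
    by_cases hi : i < l.length
    · have hc := h i (le_refl i) hi
      have hgl : l[i]? = some l[i] := List.getElem?_eq_getElem hi
      have h1 : ¬ l[i] = '"' := by intro he; exact hc.2 (by rw [hgl, he])
      have h2 : ¬ l[i] = '\'' := by intro he; exact hc.1 (by rw [hgl, he])
      rw [List.drop_eq_getElem_cons hi]
      have hstep : pvBLoop (l[i] :: l.drop (i + 1)) (i : Int)
          = pvBLoop (l.drop (i + 1)) ((i : Int) + 1) := by
        rw [pvBLoop]; simp [h1, h2]
      rw [hstep, show ((i : Int) + 1) = (((i + 1 : Nat)) : Int) from by push_cast; ring]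
      exact ih l (i + 1) (by omega) (fun q hq1 hq2 => h q (by omega) hq2)
    · rw [List.drop_eq_nil_iff.mpr (by omega)]
      simp [pvBLoop]

-- pvBLoop skips over characters that are neither quote kind
theorem pv_bloop_advance : ∀ (n : Nat) (l : List Char) (i p : Nat), p - i ≤ n → i ≤ p →
    p ≤ l.length →
    (∀ q, i ≤ q → q < p → l[q]? ≠ some '\'' ∧ l[q]? ≠ some '"') →
    pvBLoop (l.drop i) (i : Int) = pvBLoop (l.drop p) (p : Int) := by
  intro n
  induction n with
  | zero =>
    intro l i p hn hip _ _
    have : i = p := by omega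
    subst this; rfl
  | succ n ih =>
    intro l i p hn hip hpl h
    by_cases hi : i = p
    · subst hi; rfl
    · have hilt : i < l.length := by omega
      have hc := h i (le_refl i) (by omega)
      have hgl : l[i]? = some l[i] := List.getElem?_eq_getElem hilt
      have h1 : ¬ l[i] = '"' := by intro he; exact hc.2 (by rw [hgl, he])
      have h2 : ¬ l[i] = '\'' := by intro he; exact hc.1 (by rw [hgl, he])
      rw [List.drop_eq_getElem_cons hilt]
      rw [show ((i : Nat) : Int) = (i : Int) from rfl]
      have hstep : pvBLoop (l[i] :: l.drop (i + 1)) (i : Int)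
          = pvBLoop (l.drop (i + 1)) ((i : Int) + 1) := by
        rw [pvBLoop]; simp [h1, h2]
      rw [hstep, show ((i : Int) + 1) = (((i + 1 : Nat)) : Int) from by push_cast; ring]
      exact ih l (i + 1) p (by omega) (by omega) hpl (fun q hq1 hq2 => h q (by omega) hq2)

-- the outer loop agrees with the intermediate program
theorem pv_outer_eq : ∀ (f : Nat) (l : List Char) (i : Nat), l.length + 1 - i ≤ f →
    pvOuter l f i = pvBLoop (l.drop i) (i : Int) := by
  intro f
  induction f with
  | zero =>
    intro l i hf
    rw [pvOuter_zero, List.drop_eq_nil_iff.mpr (by omega)]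
    simp [pvBLoop]
  | succ f ih =>
    intro l i hf
    rw [pvOuter_succ]
    by_cases hi : i < l.length
    · rw [if_pos hi]
      rcases pv_ff_spec l '\'' i (le_of_lt hi) with ⟨hs1, hsnone⟩ | ⟨s, hs, his, hslen, hsc, hsmin⟩ <;>
        rcases pv_ff_spec l '"' i (le_of_lt hi) with ⟨hd1, hdnone⟩ | ⟨d, hd, hid, hdlen, hdc, hdmin⟩
      · -- no quotes at all
        rw [hs1, hd1, if_neg (by simp), if_pos rfl]
        exact (pv_bloop_none (l.length - i) l i (le_refl _)
          (fun q h1 h2 => ⟨hsnone q h1 h2, hdnone q h1 h2⟩)).symm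
      · -- only a double quote: enter the region
        rw [hs1, hd]
        rw [if_neg (by rintro ⟨h1, -⟩; exact h1 rfl)]
        rw [if_neg (show ¬((d : Int) = -1) by omega)]
        simp only [Int.toNat_natCast]
        have hadv := pv_bloop_advance (d - i) l i d (le_refl _) hid (le_of_lt hdlen)
          (fun q h1 h2 => ⟨hsnone q h1 (by omega), hdmin q h1 h2⟩)
        rw [hadv, List.drop_eq_getElem_cons hdlen, (List.getElem?_eq_some_iff.mp hdc).2]
        have hstep : pvBLoop ('"' :: l.drop (d + 1)) (d : Int)
            = pvBLoop (pvSkipDQ (l.drop (d + 1)) ((d : Int) + 1)).1 (pvSkipDQ (l.drop (d + 1)) ((d : Int) + 1)).2 := by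
          rw [pvBLoop]; simp
        rw [hstep, show ((d : Int) + 1) = (((d + 1 : Nat)) : Int) from by push_cast; ring,
          ← pv_inner_eq f l (d + 1) (by omega) (by omega)]
        rcases hres : pvInner l f (d + 1) with _ | i'
        · rfl
        · have hge := pv_inner_ge f l (d + 1) (by omega) i' hres
          exact ih l i' (by omega)
      · -- only a single quote
        rw [hs, hd1, if_pos ⟨by omega, Or.inl rfl⟩]
        have hadv := pv_bloop_advance (s - i) l i s (le_refl _) his (le_of_lt hslen)
          (fun q h1 h2 => ⟨hsmin q h1 h2, hdnone q h1 (by omega)⟩)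
        rw [hadv, List.drop_eq_getElem_cons hslen, (List.getElem?_eq_some_iff.mp hsc).2]
        rw [pvBLoop]
        simp
      · -- both kinds present
        have hsd : s ≠ d := by
          intro he
          rw [he, hdc] at hsc
          exact absurd (Option.some_inj.mp hsc) (by decide)
        by_cases hlt : s < d
        · rw [hs, hd, if_pos ⟨by omega, Or.inr (by exact_mod_cast hlt)⟩]
          have hadv := pv_bloop_advance (s - i) l i s (le_refl _) his (le_of_lt hslen)
            (fun q h1 h2 => ⟨hsmin q h1 h2, hdmin q h1 (by omega)⟩)
          rw [hadv, List.drop_eq_getElem_cons hslen, (List.getElem?_eq_some_iff.mp hsc).2]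
          rw [pvBLoop]
          simp
        · have hds : d < s := by omega
          rw [hs, hd]
          rw [if_neg (by rintro ⟨-, h2 | h2⟩ <;> omega)]
          rw [if_neg (show ¬((d : Int) = -1) by omega)]
          simp only [Int.toNat_natCast]
          have hadv := pv_bloop_advance (d - i) l i d (le_refl _) hid (le_of_lt hdlen)
            (fun q h1 h2 => ⟨hsmin q h1 (by omega), hdmin q h1 h2⟩)
          rw [hadv, List.drop_eq_getElem_cons hdlen, (List.getElem?_eq_some_iff.mp hdc).2]
          have hstep : pvBLoop ('"' :: l.drop (d + 1)) (d : Int)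
              = pvBLoop (pvSkipDQ (l.drop (d + 1)) ((d : Int) + 1)).1 (pvSkipDQ (l.drop (d + 1)) ((d : Int) + 1)).2 := by
            rw [pvBLoop]; simp
          rw [hstep, show ((d : Int) + 1) = (((d + 1 : Nat)) : Int) from by push_cast; ring,
            ← pv_inner_eq f l (d + 1) (by omega) (by omega)]
          rcases hres : pvInner l f (d + 1) with _ | i'
          · rfl
          · have hge := pv_inner_ge f l (d + 1) (by omega) i' hres
            exact ih l i' (by omega)
    · rw [if_neg hi, List.drop_eq_nil_iff.mpr (by omega)]
      simp [pvBLoop]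

-- ===== VERDICT (by name: the statement is the Claim_ definition above) =====
theorem find_single_quote_col_spec : Claim_equal_find_single_quote_col := by
  intro line _
  unfold Spec_find_single_quote_col find_single_quote_col find_single_quote_col_alt
  rw [(pv_main line.toList.length line.toList (Nat.le_refl _) 0).2,
      pv_outer_eq (line.toList.length + 1) line.toList 0 (by omega)]
  simp
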